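-- pv_equiv track=rewrite | github.com/UnityH24/project-euler | p2.py | generate_fib
-- ===== SOURCE A (Python) =====
-- def generate_fib(n):
--     a, b = 0, 1
--     while b < n:
--         if b % 2 == 0:
--             yield b
--         z = a + b
--         a = b
--         b = z
-- ===== SOURCE B (Python) =====
-- def generate_fib(n):
--     evens = []
--     a, b = 0, 2
--     while b < n:
--         evens.append(b)
--         a, b = b, 4 * b + a
--     yield from evens
-- ===== Notes on version B (the rewrite author's own statement) =====
-- stated objective: alternative
-- what changed: B iterates the even-Fibonacci recurrence b' = 4*b + a seeded at (0, 2), accumulating the iterates into a list and yielding them afterwards, instead of stepping through every Fibonacci number and filtering with a parity test.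
import Mathlib
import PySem

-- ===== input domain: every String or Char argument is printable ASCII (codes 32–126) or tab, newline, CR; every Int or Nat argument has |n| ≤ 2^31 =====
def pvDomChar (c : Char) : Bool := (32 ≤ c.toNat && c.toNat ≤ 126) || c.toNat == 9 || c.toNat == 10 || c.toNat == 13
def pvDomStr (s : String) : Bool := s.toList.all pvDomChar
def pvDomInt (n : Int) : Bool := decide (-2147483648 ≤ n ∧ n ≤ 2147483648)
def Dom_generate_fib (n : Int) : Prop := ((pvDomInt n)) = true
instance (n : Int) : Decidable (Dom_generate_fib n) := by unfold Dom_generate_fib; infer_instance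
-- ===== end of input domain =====

-- B replaces A's walk through every Fibonacci number with its parity test by the
-- even-Fibonacci recurrence b' = 4*b + a seeded at (0, 2), accumulating the iterates
-- into a list that is yielded afterwards (objective: alternative).
-- Both generators are ported as the list of yielded values.

-- ===== PORT A =====
-- A's while loop; the proof arguments (0 ≤ a, 1 ≤ b, a ≤ b) are invariants of the Python
-- loop, carried only to justify termination.
def pyLoopA (n a b : Int) (ha : 0 ≤ a) (hb : 1 ≤ b) (hab : a ≤ b) : List Int :=
  if h : b < n then
    (if PySem.Int.mod b 2 = 0 then [b] else []) ++
      pyLoopA n b (a + b) (by omega) (by omega) (by omega)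
  else []
termination_by ((n - a).toNat + (n - b).toNat)
decreasing_by omega

def generate_fib (n : Int) : List Int := pyLoopA n 0 1 (by omega) (by omega) (by omega)

-- ===== PORT B =====
-- B's while loop with its `evens` accumulator (Python appends at the back; the port
-- conses and reverses at the exit, which is the same list). The Nat fuel only makes the
-- recursion total; `n.toNat` steps are proved sufficient in the equivalence proof.
def pyLoopB (fuel : Nat) (n a b : Int) (evens : List Int) : List Int :=
  match fuel with
  | 0 => evens.reverse
  | f + 1 =>
    if b < n then pyLoopB f n b (4 * b + a) (b :: evens)
    else evens.reverse

def generate_fib_alt (n : Int) : List Int := pyLoopB n.toNat n 0 2 []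

-- ===== PRECONDITION & SPEC =====
def Spec_generate_fib (n : Int) (out : List Int) : Prop := out = generate_fib_alt n
instance (n : Int) (out : List Int) : Decidable (Spec_generate_fib n out) := by unfold Spec_generate_fib; infer_instance

-- ===== CLAIM (what is proved, stated in full; the proofs are below) =====
def Claim_equal_generate_fib : Prop := ∀ (n : Int), Dom_generate_fib n → Spec_generate_fib n (generate_fib n)

-- ===== LEMMAS AND PROOFS =====

-- The accumulator only collects already-produced output in front.
theorem pyLoopB_acc (fuel : Nat) : ∀ (n a b : Int) (evens : List Int),
    pyLoopB fuel n a b evens = evens.reverse ++ pyLoopB fuel n a b [] := by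
  induction fuel with
  | zero => intro n a b evens; simp [pyLoopB]
  | succ f ih =>
    intro n a b evens
    by_cases h : b < n
    · rw [pyLoopB, if_pos h, pyLoopB, if_pos h, ih n b (4*b+a) (b :: evens),
        ih n b (4*b+a) [b]]
      simp
    · rw [pyLoopB, if_neg h, pyLoopB, if_neg h]; simp

theorem pyLoopB_stop (fuel : Nat) (n a b : Int) (h : ¬ b < n) :
    pyLoopB fuel n a b [] = [] := by
  cases fuel with
  | zero => simp [pyLoopB]
  | succ f => rw [pyLoopB, if_neg h]; simp

-- Three steps of A's loop from a state (a odd, b even) yield exactly b (if b < n) and land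
-- on the next such state (a + 2b, 2a + 3b); B's state tracks A's as (2a - b, b), and
-- a fuel of at least n - b steps never runs out because b grows each step.
theorem pyLoopA_eq_pyLoopB (m : Nat) : ∀ (n a b : Int) (ha : 0 ≤ a) (hb : 1 ≤ b)
    (hab : a ≤ b) (fuel : Nat),
    (n - b).toNat ≤ m → n ≤ b + fuel → a % 2 = 1 → b % 2 = 0 → 0 ≤ 2*a - b →
    pyLoopA n a b ha hb hab = pyLoopB fuel n (2*a - b) b [] := by
  induction m with
  | zero =>
    intro n a b ha hb hab fuel hm hfuel hoa hob hpa
    rw [pyLoopA, dif_neg (by omega)]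
    exact (pyLoopB_stop fuel n (2*a - b) b (by omega)).symm
  | succ m ih =>
    intro n a b ha hb hab fuel hm hfuel hoa hob hpa
    by_cases hbn : b < n
    · obtain ⟨f, rfl⟩ : ∃ f, fuel = f + 1 := by
        cases fuel with
        | zero => omega
        | succ f => exact ⟨f, rfl⟩
      rw [pyLoopA, dif_pos hbn]
      have hmod : PySem.Int.mod b 2 = 0 := by
        rw [PySem.Int.mod_eq_emod_of_pos (by omega)]; omega
      rw [if_pos hmod]
      rw [pyLoopB, if_pos hbn, pyLoopB_acc f n b (4 * b + (2*a - b)) [b]]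
      have harg : 4 * b + (2 * a - b) = 2*a + 3*b := by ring
      rw [harg]
      simp only [List.reverse_singleton, List.cons_append, List.nil_append]
      congr 1
      rw [pyLoopA]
      by_cases h1 : a + b < n
      · rw [dif_pos h1]
        have hmod1 : ¬ PySem.Int.mod (a + b) 2 = 0 := by
          rw [PySem.Int.mod_eq_emod_of_pos (by omega)]; omega
        rw [if_neg hmod1]
        rw [pyLoopA]
        by_cases h2 : a + 2*b < n
        · have h2' : b + (a + b) < n := by omega
          rw [dif_pos h2']
          have hmod2 : ¬ PySem.Int.mod (b + (a + b)) 2 = 0 := by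
            rw [PySem.Int.mod_eq_emod_of_pos (by omega)]; omega
          rw [if_neg hmod2]
          have := ih n (b + (a + b)) (a + b + (b + (a + b))) (by omega) (by omega)
            (by omega) f (by omega) (by omega) (by omega) (by omega) (by omega)
          rw [this]
          simp only [List.nil_append]
          congr 1 <;> ring
        · have h2' : ¬ b + (a + b) < n := by omega
          rw [dif_neg h2', (pyLoopB_stop f n b (2*a + 3*b) (by omega))]
          simp
      · rw [dif_neg h1, (pyLoopB_stop f n b (2*a + 3*b) (by omega))]
    · rw [pyLoopA, dif_neg hbn]
      exact (pyLoopB_stop fuel n (2*a - b) b hbn).symm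

theorem generate_fib_spec : Claim_equal_generate_fib := by
  intro n _
  unfold Spec_generate_fib generate_fib generate_fib_alt
  rw [pyLoopA]
  by_cases h1 : (1:Int) < n
  · rw [dif_pos h1]
    have hm1 : ¬ PySem.Int.mod (1:Int) 2 = 0 := by decide
    rw [if_neg hm1]
    norm_num
    rw [pyLoopA, dif_pos (by omega : (1:Int) < n), if_neg hm1]
    norm_num
    have := pyLoopA_eq_pyLoopB (n - 2).toNat n 1 2 (by omega) (by omega) (by omega)
      n.toNat (by omega) (by omega) (by omega) (by omega) (by omega)
    norm_num at this
    exact this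
  · rw [dif_neg h1]
    exact (pyLoopB_stop n.toNat n 0 2 (by omega)).symm
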